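-- pv_equiv track=rewrite | github.com/GEANT/bubo | bubo/core/report/statistics.py | extract_dane_statuses
-- ===== SOURCE A (Python) =====
-- def extract_dane_statuses(dane_state: dict) -> tuple[list[str], list[str], list[str]]:
--     """
--     Extract DANE status lists for different server types.
--
--     Args:
--         dane_state: DANE validation state by domain
--
--     Returns:
--         tuple of (MX statuses, NS statuses, Mail server NS statuses)
--     """
--     dane_mx_statuses = [
--         state.get("Mail Server of Domain", "not-found") for state in dane_state.values()
--     ]
--     dane_ns_statuses = [
--         state.get("Nameserver of Domain", "not-found") for state in dane_state.values()
--     ]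
--     dane_mailserver_ns_statuses = [
--         state.get("Nameserver of Mail Server", "not-found")
--         for state in dane_state.values()
--     ]
--
--     return dane_mx_statuses, dane_ns_statuses, dane_mailserver_ns_statuses
-- ===== SOURCE B (Python) =====
-- _KEYS = ("Mail Server of Domain", "Nameserver of Domain", "Nameserver of Mail Server")
--
-- def extract_dane_statuses(dane_state: dict) -> tuple[list[str], list[str], list[str]]:
--     """Row-major then transpose: build one status-row per domain, zip(*rows) yields the columns."""
--     rows = [tuple(state.get(k, "not-found") for k in _KEYS) for state in dane_state.values()]
--     if not rows:
--         return [], [], []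
--     mx, ns, ms = (list(col) for col in zip(*rows))
--     return mx, ns, ms
-- ===== Notes on version B (the rewrite author's own statement) =====
-- stated objective: alternative
-- what changed: A extracts each of the three status lists by a separate column-wise scan of dane_state; B builds a row-major list of per-domain status triples once and transposes it with zip(*rows) to obtain the three columns.
import Mathlib
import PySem

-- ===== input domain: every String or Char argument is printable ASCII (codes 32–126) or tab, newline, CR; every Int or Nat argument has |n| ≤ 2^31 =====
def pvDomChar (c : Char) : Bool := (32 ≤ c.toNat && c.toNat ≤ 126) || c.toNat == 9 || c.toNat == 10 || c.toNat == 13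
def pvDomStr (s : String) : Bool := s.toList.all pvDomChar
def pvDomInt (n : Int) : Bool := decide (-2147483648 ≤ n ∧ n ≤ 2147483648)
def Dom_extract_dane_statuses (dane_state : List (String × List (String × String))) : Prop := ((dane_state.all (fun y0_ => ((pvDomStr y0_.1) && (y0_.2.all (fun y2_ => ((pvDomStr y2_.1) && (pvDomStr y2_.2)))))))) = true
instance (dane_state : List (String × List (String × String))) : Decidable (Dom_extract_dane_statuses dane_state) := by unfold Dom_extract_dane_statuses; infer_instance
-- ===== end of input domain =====

-- B builds a row-major list of per-domain status triples and transposes it; A scans column-wise three times. Equal results proved on all inputs.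
-- ===== PORT A =====
-- state.get(k, "not-found") = first-match lookup with default.
def pvGetD (state : List (String × String)) (k : String) : String :=
  (PySem.Dict.mk state).getD k "not-found"

-- A: three separate comprehensions over dane_state.values().
def extract_dane_statuses (dane_state : List (String × List (String × String))) : List String × List String × List String :=
  let dane_mx_statuses := dane_state.map (fun kv => pvGetD kv.2 "Mail Server of Domain")
  let dane_ns_statuses := dane_state.map (fun kv => pvGetD kv.2 "Nameserver of Domain")
  let dane_mailserver_ns_statuses := dane_state.map (fun kv => pvGetD kv.2 "Nameserver of Mail Server")
  (dane_mx_statuses, dane_ns_statuses, dane_mailserver_ns_statuses)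

-- ===== PORT B =====
-- zip(*rows) on rows of width 3: structural transpose of the row-major triples.
def pvUnzip3 : List (String × String × String) → List String × List String × List String
  | [] => ([], [], [])
  | (a, b, c) :: t =>
    let (xs, ys, zs) := pvUnzip3 t
    (a :: xs, b :: ys, c :: zs)

-- B: row per domain (status triple per _KEYS), then transpose; empty rows returns ([],[],[]).
def extract_dane_statuses_alt (dane_state : List (String × List (String × String))) : List String × List String × List String :=
  let rows := dane_state.map (fun kv =>
    (pvGetD kv.2 "Mail Server of Domain",
     pvGetD kv.2 "Nameserver of Domain",
     pvGetD kv.2 "Nameserver of Mail Server"))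
  if rows = [] then ([], [], [])
  else pvUnzip3 rows

-- ===== PRECONDITION & SPEC =====
def Spec_extract_dane_statuses (dane_state : List (String × List (String × String))) (out : List String × List String × List String) : Prop := out = extract_dane_statuses_alt dane_state
instance (dane_state : List (String × List (String × String))) (out : List String × List String × List String) : Decidable (Spec_extract_dane_statuses dane_state out) := by unfold Spec_extract_dane_statuses; infer_instance

-- ===== CLAIM (what is proved, stated in full; the proofs are below) =====
def Claim_equal_extract_dane_statuses : Prop := ∀ (dane_state : List (String × List (String × String))), Dom_extract_dane_statuses dane_state → Spec_extract_dane_statuses dane_state (extract_dane_statuses dane_state)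

-- ===== LEMMAS AND PROOFS =====

lemma pvUnzip3_map (l : List (String × List (String × String))) :
    pvUnzip3 (l.map (fun kv =>
      (pvGetD kv.2 "Mail Server of Domain",
       pvGetD kv.2 "Nameserver of Domain",
       pvGetD kv.2 "Nameserver of Mail Server")))
    = (l.map (fun kv => pvGetD kv.2 "Mail Server of Domain"),
       l.map (fun kv => pvGetD kv.2 "Nameserver of Domain"),
       l.map (fun kv => pvGetD kv.2 "Nameserver of Mail Server")) := by
  induction l with
  | nil => simp [pvUnzip3]
  | cons h t ih => simp [pvUnzip3, ih]

-- ===== VERDICT (by name: the statement is the Claim_ definition above) =====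
theorem extract_dane_statuses_spec : Claim_equal_extract_dane_statuses := by
  intro dane_state _
  unfold Spec_extract_dane_statuses extract_dane_statuses extract_dane_statuses_alt
  cases dane_state with
  | nil => simp
  | cons h t =>
    rw [show ((h :: t).map (fun kv =>
      (pvGetD kv.2 "Mail Server of Domain",
       pvGetD kv.2 "Nameserver of Domain",
       pvGetD kv.2 "Nameserver of Mail Server"))) = _ from rfl]
    simp only [pvUnzip3_map (h :: t)]
    simp
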